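-- pv_equiv track=rewrite | github.com/arras-energy/gridlabd-old | converters/mdb-cyme2glm.py | arrangeString
-- ===== SOURCE A (Python) =====
-- def arrangeString(string):
-- 	MAX_CHAR = 26
-- 	char_count = [0] * MAX_CHAR
-- 	s = 0
--
-- 	for i in range(len(string)):
-- 		if string[i] >= "A" and string[i] <= "Z":
-- 			char_count[ord(string[i]) - ord("A")] += 1
-- 		else:
-- 			s += ord(string[i]) - ord("0")
-- 	res = ""
--
-- 	for i in range(MAX_CHAR):
-- 		ch = chr(ord("A") + i)
-- 		while char_count[i]:
-- 			res += ch
-- 			char_count[i] -= 1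
-- 	if s > 0:
-- 		res += str(s)
--
-- 	return res
-- ===== SOURCE B (Python) =====
-- def arrangeString(string):
--     letters = ''.join(sorted(c for c in string if 'A' <= c <= 'Z'))
--     s = sum(ord(c) - ord('0') for c in string if not ('A' <= c <= 'Z'))
--     return letters + str(s) if s > 0 else letters
-- ===== Notes on version B (the rewrite author's own statement) =====
-- stated objective: simpler
-- what changed: Replaces the 26-bucket counting sort (tally array + nested while-loop emission) with a library comparison sort of the filtered letters and a direct generator sum of the digit contributions.
import Mathlib
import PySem

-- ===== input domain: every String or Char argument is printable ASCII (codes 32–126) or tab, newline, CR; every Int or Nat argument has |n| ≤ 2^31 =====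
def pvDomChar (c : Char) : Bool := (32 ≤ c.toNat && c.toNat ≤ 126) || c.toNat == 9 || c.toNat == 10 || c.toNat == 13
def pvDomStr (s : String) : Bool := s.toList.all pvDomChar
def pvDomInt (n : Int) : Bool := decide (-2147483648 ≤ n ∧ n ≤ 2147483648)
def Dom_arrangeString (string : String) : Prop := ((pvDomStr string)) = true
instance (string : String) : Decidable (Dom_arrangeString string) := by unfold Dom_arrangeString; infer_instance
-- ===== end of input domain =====

-- B replaces A's 26-bucket counting sort (tally array + while-loop emission) with a
-- library comparison sort of the filtered letters and a direct sum of the digit terms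
-- (objective: simpler; same return value).

-- ===== PORT A =====
-- first loop: tally uppercase letters, accumulate s over the other characters
def pvAStep (p : List Int × Int) (c : Char) : List Int × Int :=
  if 'A' ≤ c ∧ c ≤ 'Z' then
    (p.1.set (c.toNat - 65) (p.1.getD (c.toNat - 65) 0 + 1), p.2)
  else
    (p.1, p.2 + ((c.toNat : Int) - 48))

-- the inner `while char_count[i]: res += ch; char_count[i] -= 1` (the count is nonnegative)
def pvAEmit (ch : Char) : Nat → String → String
  | 0, res => res
  | n + 1, res => pvAEmit ch n (res.push ch)

def arrangeString (string : String) : String :=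
  let p := string.toList.foldl pvAStep (List.replicate 26 0, 0)
  let res := (List.range 26).foldl
    (fun res i => pvAEmit (Char.ofNat (65 + i)) ((p.1.getD i 0).toNat) res) ""
  if p.2 > 0 then res ++ PySem.Int.toStr p.2 else res

-- ===== PORT B =====
def arrangeString_alt (string : String) : String :=
  let letters := String.ofList
    (PySem.List.sorted (string.toList.filter (fun c => decide ('A' ≤ c ∧ c ≤ 'Z'))) (fun c => c) false)
  let s := ((string.toList.filter (fun c => !(decide ('A' ≤ c ∧ c ≤ 'Z')))).map
    (fun c => (c.toNat : Int) - 48)).sum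
  if s > 0 then letters ++ PySem.Int.toStr s else letters

-- ===== PRECONDITION & SPEC =====
def Spec_arrangeString (string : String) (out : String) : Prop := out = arrangeString_alt string
instance (string : String) (out : String) : Decidable (Spec_arrangeString string out) := by unfold Spec_arrangeString; infer_instance

-- ===== CLAIM (what is proved, stated in full; the proofs are below) =====
def Claim_equal_arrangeString : Prop := ∀ (string : String), Dom_arrangeString string → Spec_arrangeString string (arrangeString string)

-- ===== LEMMAS AND PROOFS =====

theorem pv_le_iff {c d : Char} : c ≤ d ↔ c.toNat ≤ d.toNat := by
  rw [Char.le_def]; exact UInt32.le_iff_toNat_le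

theorem pv_toNat_inj {c d : Char} (h : c.toNat = d.toNat) : c = d := by
  rw [← Char.ofNat_toNat c, ← Char.ofNat_toNat d, h]

theorem pv_chr_toNat {i : Nat} (h : i < 26) : (Char.ofNat (65 + i)).toNat = 65 + i := by
  rw [Char.toNat_ofNat, if_pos (Or.inl (by omega))]

theorem pv_up_bounds {c : Char} (h : 'A' ≤ c ∧ c ≤ 'Z') : 65 ≤ c.toNat ∧ c.toNat ≤ 90 :=
  ⟨pv_le_iff.mp h.1, pv_le_iff.mp h.2⟩

theorem pv_up_chr {i : Nat} (hi : i < 26) : 'A' ≤ Char.ofNat (65 + i) ∧ Char.ofNat (65 + i) ≤ 'Z' := by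
  have h65 : 'A'.toNat = 65 := rfl
  have h90 : 'Z'.toNat = 90 := rfl
  constructor <;> rw [pv_le_iff, pv_chr_toNat hi] <;> omega

theorem pv_getD_set (l : List Int) (k i : Nat) (v : Int) (hk : k < l.length) :
    (l.set k v).getD i 0 = if k = i then v else l.getD i 0 := by
  rcases eq_or_ne k i with rfl | hne
  · simp [List.getD_eq_getElem?_getD, List.getElem?_set_self hk]
  · simp [List.getD_eq_getElem?_getD, List.getElem?_set_ne hne, hne]

-- s-accumulator characterisation of A's first loop
theorem pv_fold_snd (l : List Char) : ∀ (cc : List Int) (s0 : Int),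
    (l.foldl pvAStep (cc, s0)).2
      = s0 + ((l.filter (fun c => !(decide ('A' ≤ c ∧ c ≤ 'Z')))).map (fun c => (c.toNat : Int) - 48)).sum := by
  induction l with
  | nil => intro cc s0; simp
  | cons c t ih =>
    intro cc s0
    rw [List.foldl_cons]
    by_cases h : 'A' ≤ c ∧ c ≤ 'Z'
    · simp only [pvAStep, if_pos h]
      rw [ih, List.filter_cons_of_neg (by simp [h])]
    · simp only [pvAStep, if_neg h]
      rw [ih, List.filter_cons_of_pos (by simp [h])]
      simp only [List.map_cons, List.sum_cons]
      ring

-- tally characterisation of A's first loop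
theorem pv_fold_fst (l : List Char) : ∀ (cc : List Int) (s0 : Int), cc.length = 26 → ∀ i, i < 26 →
    ((l.foldl pvAStep (cc, s0)).1).getD i 0
      = cc.getD i 0 + (l.countP (fun c => decide ('A' ≤ c ∧ c ≤ 'Z') && (c.toNat - 65 == i)) : Int) := by
  induction l with
  | nil => intro cc s0 _ i _; simp
  | cons c t ih =>
    intro cc s0 hlen i hi
    rw [List.foldl_cons, List.countP_cons]
    by_cases h : 'A' ≤ c ∧ c ≤ 'Z'
    · have hb := pv_up_bounds h
      simp only [pvAStep, if_pos h]
      rw [ih _ _ (by simp [hlen]) i hi, pv_getD_set cc _ i _ (by rw [hlen]; omega)]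
      rcases eq_or_ne (c.toNat - 65) i with he | hne
      · rw [if_pos he]
        have : (decide ('A' ≤ c ∧ c ≤ 'Z') && (c.toNat - 65 == i)) = true := by simp [h, he]
        rw [this, he]
        simp only [if_true]
        omega
      · rw [if_neg hne]
        have : (decide ('A' ≤ c ∧ c ≤ 'Z') && (c.toNat - 65 == i)) = false := by simp [hne]
        rw [this]
        simp
    · simp only [pvAStep, if_neg h]
      rw [ih _ _ hlen i hi]
      have : (decide ('A' ≤ c ∧ c ≤ 'Z') && (c.toNat - 65 == i)) = false := by simp [h]
      rw [this]
      simp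

-- the emission loop appends replicate blocks
theorem pv_aEmit_toList (ch : Char) : ∀ (n : Nat) (res : String),
    (pvAEmit ch n res).toList = res.toList ++ List.replicate n ch := by
  intro n
  induction n with
  | zero => intro res; simp [pvAEmit]
  | succ m ih =>
    intro res
    rw [pvAEmit, ih]
    simp [List.replicate_succ]

theorem pv_emit_fold (g : Nat → Nat) : ∀ (is : List Nat) (res : String),
    ((is.foldl (fun res i => pvAEmit (Char.ofNat (65 + i)) (g i) res) res)).toList
      = res.toList ++ is.flatMap (fun i => List.replicate (g i) (Char.ofNat (65 + i))) := by
  intro is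
  induction is with
  | nil => intro res; simp
  | cons j t ih =>
    intro res
    rw [List.foldl_cons, ih, pv_aEmit_toList]
    simp

theorem pv_count_flatMap {α β : Type} [BEq α] (g : β → List α) (a : α) :
    ∀ (is : List β), ((is.flatMap g).count a) = (is.map (fun i => (g i).count a)).sum := by
  intro is
  induction is with
  | nil => simp
  | cons j t ih => simp [List.count_append, ih]

theorem pv_sum_map_range_single (f : Nat → Nat) :
    ∀ (n k : Nat), k < n → (∀ i, i < n → i ≠ k → f i = 0) →
    ((List.range n).map f).sum = f k := by
  intro n
  induction n with
  | zero => omega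
  | succ m ih =>
    intro k hk h0
    rw [List.range_succ]
    rcases eq_or_ne k m with rfl | hne
    · have : ((List.range k).map f).sum = 0 := by
        apply List.sum_eq_zero
        intro x hx
        obtain ⟨i, hi, rfl⟩ := List.mem_map.mp hx
        rw [List.mem_range] at hi
        exact h0 i (by omega) (by omega)
      simp [this]
    · rw [List.map_append, List.sum_append]
      have := ih k (by omega) (fun i hi hik => h0 i (by omega) hik)
      simp [this, h0 m (by omega) (Ne.symm hne)]

-- the buckets are a permutation of the filtered letters
theorem pv_buckets_perm (m : List Char) (hm : ∀ c ∈ m, 'A' ≤ c ∧ c ≤ 'Z') :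
    ((List.range 26).flatMap
      (fun i => List.replicate (m.countP (fun c => c.toNat - 65 == i)) (Char.ofNat (65 + i)))).Perm m := by
  rw [List.perm_iff_count]
  intro a
  rw [pv_count_flatMap]
  by_cases ha : 'A' ≤ a ∧ a ≤ 'Z'
  · have hb := pv_up_bounds ha
    have hk : a.toNat - 65 < 26 := by omega
    have hchr : Char.ofNat (65 + (a.toNat - 65)) = a := by
      conv_rhs => rw [← Char.ofNat_toNat a]
      congr 1
      omega
    rw [pv_sum_map_range_single _ 26 (a.toNat - 65) hk]
    · rw [List.count_replicate, if_pos (by rw [beq_iff_eq, hchr]), List.count_eq_countP]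
      apply List.countP_congr
      intro c hc
      have hcb := pv_up_bounds (hm c hc)
      simp only [beq_iff_eq]
      constructor
      · intro hcc
        exact pv_toNat_inj (by omega)
      · rintro rfl
        rfl
    · intro i hi hik
      rw [List.count_replicate, if_neg]
      rw [beq_iff_eq]
      intro he
      have := pv_chr_toNat hi
      rw [he] at this
      omega
  · have h1 : m.count a = 0 := by
      rw [List.count_eq_zero]
      intro hmem
      exact ha (hm a hmem)
    rw [h1]
    apply List.sum_eq_zero
    intro x hx
    obtain ⟨i, hi, rfl⟩ := List.mem_map.mp hx
    rw [List.mem_range] at hi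
    rw [List.count_replicate, if_neg]
    rw [beq_iff_eq]
    rintro rfl
    exact ha (pv_up_chr hi)

-- the buckets are sorted
theorem pv_buckets_pairwise (g : Nat → Nat) :
    ((List.range 26).flatMap
      (fun i => List.replicate (g i) (Char.ofNat (65 + i)))).Pairwise (· ≤ ·) := by
  rw [List.pairwise_flatMap]
  constructor
  · intro i _
    exact List.pairwise_replicate.mpr (Or.inr (le_refl (Char.ofNat (65 + i))))
  · have hp : (List.range 26).Pairwise (· < ·) := List.pairwise_lt_range
    refine hp.imp_of_mem ?_
    intro i j hi hj hij x hx y hy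
    rw [List.eq_of_mem_replicate hx, List.eq_of_mem_replicate hy, pv_le_iff,
      pv_chr_toNat (List.mem_range.mp hi), pv_chr_toNat (List.mem_range.mp hj)]
    omega

-- ===== VERDICT (by name: the statement is the Claim_ definition above) =====
theorem arrangeString_spec : Claim_equal_arrangeString := by
  intro string _
  unfold Spec_arrangeString arrangeString arrangeString_alt
  dsimp only
  set l := string.toList with hl
  set p := l.foldl pvAStep (List.replicate 26 0, 0) with hp
  set m := l.filter (fun c => decide ('A' ≤ c ∧ c ≤ 'Z')) with hmdef
  have hm : ∀ c ∈ m, 'A' ≤ c ∧ c ≤ 'Z' := by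
    intro c hc
    rw [hmdef] at hc
    have := List.of_mem_filter hc
    simpa using this
  have hs : p.2 = ((l.filter (fun c => !(decide ('A' ≤ c ∧ c ≤ 'Z')))).map (fun c => (c.toNat : Int) - 48)).sum := by
    rw [hp, pv_fold_snd, zero_add]
  have hcnt : ∀ i, i < 26 → (p.1.getD i 0).toNat = m.countP (fun c => c.toNat - 65 == i) := by
    intro i hi
    rw [hp, pv_fold_fst _ _ _ (by simp) i hi]
    rw [List.getD_eq_getElem?_getD, List.getElem?_replicate]
    have hcp : m.countP (fun c => c.toNat - 65 == i)
        = l.countP (fun c => decide ('A' ≤ c ∧ c ≤ 'Z') && (c.toNat - 65 == i)) := by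
      rw [hmdef, List.countP_filter]
      apply List.countP_congr
      intro c _
      rw [Bool.and_comm]
    rw [hcp]
    simp [hi]
  have hletters : ((List.range 26).foldl
      (fun res i => pvAEmit (Char.ofNat (65 + i)) ((p.1.getD i 0).toNat) res) "").toList
      = PySem.List.sorted m (fun c => c) false := by
    rw [pv_emit_fold]
    have hfl : (List.range 26).flatMap (fun i => List.replicate ((p.1.getD i 0).toNat) (Char.ofNat (65 + i)))
        = (List.range 26).flatMap (fun i => List.replicate (m.countP (fun c => c.toNat - 65 == i)) (Char.ofNat (65 + i))) := by
      simp only [List.flatMap_def]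
      rw [List.map_congr_left]
      intro i hiimem
      rw [hcnt i (List.mem_range.mp hiimem)]
    rw [hfl]
    have := PySem.List.sorted_id_eq_of_perm_of_pairwise m _ (pv_buckets_perm m hm) (pv_buckets_pairwise _)
    rw [this]
    simp
  have hres : ((List.range 26).foldl
      (fun res i => pvAEmit (Char.ofNat (65 + i)) ((p.1.getD i 0).toNat) res) "")
      = String.ofList (PySem.List.sorted m (fun c => c) false) := by
    apply String.toList_inj.mp
    rw [hletters]
    simp
  rw [hres, hs]
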